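-- pv_equiv track=rewrite | github.com/ahrorhaidarov/Matnboz | app.py | remove_initial_uppercase
-- ===== SOURCE A (Python) =====
-- def remove_initial_uppercase(sentence):
--     words = sentence.split()
--     new_words = []
--     found_real_start = False
--
--     for word in words:
--         if not word.isupper() or len(word) <= 2:
--             found_real_start = True
--         if found_real_start:
--             new_words.append(word)
--     return ' '.join(new_words)
-- ===== SOURCE B (Python) =====
-- def remove_initial_uppercase(sentence):
--     # Locate the cutoff by dropping the leading run of long all-caps words,
--     # then join the remainder once.
--     words = sentence.split()
--     while words and words[0].isupper() and len(words[0]) > 2: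
--         words = words[1:]
--     return ' '.join(words)
-- ===== Notes on version B (the rewrite author's own statement) =====
-- stated objective: simpler
-- what changed: Replaces the per-word flag-and-append accumulation with a drop-while loop that finds the cutoff and joins the remaining slice once.
import Mathlib
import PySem

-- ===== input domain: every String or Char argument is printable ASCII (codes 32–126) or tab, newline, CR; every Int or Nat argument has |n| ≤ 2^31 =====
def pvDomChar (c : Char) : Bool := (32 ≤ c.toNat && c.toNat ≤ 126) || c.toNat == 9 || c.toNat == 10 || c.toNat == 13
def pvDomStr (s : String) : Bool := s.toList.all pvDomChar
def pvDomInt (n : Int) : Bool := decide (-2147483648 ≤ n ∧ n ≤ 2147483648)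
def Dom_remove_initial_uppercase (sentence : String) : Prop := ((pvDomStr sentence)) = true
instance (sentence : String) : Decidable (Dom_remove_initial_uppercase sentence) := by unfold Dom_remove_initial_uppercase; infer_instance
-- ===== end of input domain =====

-- B replaces A's flag-and-append accumulation by a drop-while cutoff then a single join (simpler decomposition, same cost).

-- shared helper: Python str.isupper() (exact on ASCII: some cased char, and no lowercase one)
def pyStrIsupper (s : String) : Bool :=
  (s.toList.any fun c => PySem.Chars.isupper c || PySem.Chars.islower c) &&
  (s.toList.all fun c => !PySem.Chars.islower c)

-- ===== PORT A =====
-- A's loop body: update the flag, then conditionally append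
def aStep (st : List String × Bool) (word : String) : List String × Bool :=
  let found := if !pyStrIsupper word || PySem.Str.len word ≤ 2 then true else st.2
  if found then (st.1 ++ [word], found) else (st.1, found)

def remove_initial_uppercase (sentence : String) : String :=
  let words := PySem.Str.split₀ sentence
  let st := words.foldl aStep ([], false)
  PySem.Str.join " " st.1

-- ===== PORT B =====
-- B's while loop: drop leading words that are all-caps and longer than 2
def bDrop : List String → List String
  | [] => []
  | w :: ws => if pyStrIsupper w && PySem.Str.len w > 2 then bDrop ws else w :: ws

def remove_initial_uppercase_alt (sentence : String) : String :=
  PySem.Str.join " " (bDrop (PySem.Str.split₀ sentence))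

-- ===== PRECONDITION & SPEC =====
def Spec_remove_initial_uppercase (sentence : String) (out : String) : Prop := out = remove_initial_uppercase_alt sentence
instance (sentence : String) (out : String) : Decidable (Spec_remove_initial_uppercase sentence out) := by unfold Spec_remove_initial_uppercase; infer_instance

-- ===== CLAIM (what is proved, stated in full; the proofs are below) =====
def Claim_equal_remove_initial_uppercase : Prop := ∀ (sentence : String), Dom_remove_initial_uppercase sentence → Spec_remove_initial_uppercase sentence (remove_initial_uppercase sentence)

-- ===== LEMMAS AND PROOFS =====
theorem cond_eq (w : String) :
    (!pyStrIsupper w || decide (PySem.Str.len w ≤ 2)) = !(pyStrIsupper w && decide (PySem.Str.len w > 2)) := by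
  cases pyStrIsupper w
  · simp
  · simp only [Bool.not_true, Bool.true_and, Bool.false_or, Bool.not_false]
    rw [← decide_not, decide_eq_decide]
    omega

theorem aStep_false_skip (acc : List String) (w : String)
    (hp : (pyStrIsupper w && decide (PySem.Str.len w > 2)) = true) :
    aStep (acc, false) w = (acc, false) := by
  unfold aStep; rw [cond_eq, hp]; simp

theorem aStep_false_take (acc : List String) (w : String)
    (hp : (pyStrIsupper w && decide (PySem.Str.len w > 2)) = false) :
    aStep (acc, false) w = (acc ++ [w], true) := by
  unfold aStep; rw [cond_eq, hp]; simp

theorem foldl_aStep_true (ws : List String) (acc : List String) :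
    (ws.foldl aStep (acc, true)).1 = acc ++ ws := by
  induction ws generalizing acc with
  | nil => simp
  | cons w ws ih =>
    simp only [List.foldl_cons]
    have h : aStep (acc, true) w = (acc ++ [w], true) := by
      unfold aStep; split_ifs <;> simp_all
    rw [h, ih]; simp

theorem foldl_aStep_false (ws : List String) (acc : List String) :
    (ws.foldl aStep (acc, false)).1 = acc ++ bDrop ws := by
  induction ws generalizing acc with
  | nil => simp [bDrop]
  | cons w ws ih =>
    simp only [List.foldl_cons]
    cases hp : (pyStrIsupper w && decide (PySem.Str.len w > 2)) with
    | true =>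
      rw [aStep_false_skip acc w hp, ih,
        show bDrop (w :: ws) = if pyStrIsupper w && decide (PySem.Str.len w > 2) then bDrop ws else w :: ws from rfl, hp]
      simp
    | false =>
      rw [aStep_false_take acc w hp, foldl_aStep_true,
        show bDrop (w :: ws) = if pyStrIsupper w && decide (PySem.Str.len w > 2) then bDrop ws else w :: ws from rfl, hp]
      simp

-- ===== VERDICT (by name: the statement is the Claim_ definition above) =====
theorem remove_initial_uppercase_spec : Claim_equal_remove_initial_uppercase := by
  intro sentence _
  unfold Spec_remove_initial_uppercase remove_initial_uppercase remove_initial_uppercase_alt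
  simp only []
  rw [show (have words := PySem.Str.split₀ sentence;
      have st := List.foldl aStep ([], false) words;
      PySem.Str.join " " st.1) = PySem.Str.join " " ((List.foldl aStep ([], false) (PySem.Str.split₀ sentence)).1) from rfl]
  rw [foldl_aStep_false]
  simp
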